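-- pv_equiv track=rewrite | github.com/saidaladawi/universal-workshop-erp | phase3_backup/before-workshop_operations/universal_workshop/workshop_operations/service_order_labor/service_order_labor.py | convert_to_arabic_numerals
-- ===== SOURCE A (Python) =====
-- def convert_to_arabic_numerals(text):
--     """Convert Western numerals to Arabic-Indic numerals"""
--     arabic_numerals = {
--         "0": "٠",
--         "1": "١",
--         "2": "٢",
--         "3": "٣",
--         "4": "٤",
--         "5": "٥",
--         "6": "٦",
--         "7": "٧",
--         "8": "٨",
--         "9": "٩",
--     }
--
--     for western, arabic in arabic_numerals.items():
--         text = text.replace(western, arabic)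
--     return text
-- ===== SOURCE B (Python) =====
-- def convert_to_arabic_numerals(text):
--     """Convert Western numerals to Arabic-Indic numerals"""
--     arabic_numerals = {
--         "0": "٠",
--         "1": "١",
--         "2": "٢",
--         "3": "٣",
--         "4": "٤",
--         "5": "٥",
--         "6": "٦",
--         "7": "٧",
--         "8": "٨",
--         "9": "٩",
--     }
--     return "".join(arabic_numerals.get(ch, ch) for ch in text)
-- ===== Notes on version B (the rewrite author's own statement) =====
-- stated objective: idiomatic
-- what changed: Replaces ten full-string .replace scans (one per digit) with a single character-by-character pass that joins each character's translation (dict lookup with pass-through default).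
import Mathlib
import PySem

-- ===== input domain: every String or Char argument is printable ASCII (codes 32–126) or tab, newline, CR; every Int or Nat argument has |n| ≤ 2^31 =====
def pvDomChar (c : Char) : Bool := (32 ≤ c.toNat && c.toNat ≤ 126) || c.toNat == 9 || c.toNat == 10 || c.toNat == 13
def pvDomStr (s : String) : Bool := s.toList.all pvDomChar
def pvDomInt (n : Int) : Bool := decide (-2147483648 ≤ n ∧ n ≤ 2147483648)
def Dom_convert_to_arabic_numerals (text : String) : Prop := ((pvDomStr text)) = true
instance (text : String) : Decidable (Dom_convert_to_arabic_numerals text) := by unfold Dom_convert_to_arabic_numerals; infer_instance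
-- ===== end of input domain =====

-- B changes the traversal: one pass over the characters joining per-character translations,
-- instead of A's ten whole-string .replace scans (idiomatic; same result).

-- ===== PORT A =====
-- A's digit dict (string keys/values, as in the Python)
def pvMapA : PySem.Dict String String :=
  PySem.Dict.ofList [("0", "٠"), ("1", "١"), ("2", "٢"), ("3", "٣"), ("4", "٤"),
                     ("5", "٥"), ("6", "٦"), ("7", "٧"), ("8", "٨"), ("9", "٩")]

def convert_to_arabic_numerals (text : String) : String :=
  pvMapA.items.foldl (fun t p => PySem.Str.replace t p.1 p.2) text

-- ===== PORT B =====
-- B's dict; Python's 1-character strings (text's chars, the dict's keys/values) are Char here,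
-- and "".join of the per-character translations is String.ofList of the mapped char list.
def pvMapB : PySem.Dict Char Char :=
  PySem.Dict.ofList [('0', '٠'), ('1', '١'), ('2', '٢'), ('3', '٣'), ('4', '٤'),
                     ('5', '٥'), ('6', '٦'), ('7', '٧'), ('8', '٨'), ('9', '٩')]

def convert_to_arabic_numerals_alt (text : String) : String :=
  String.ofList (text.toList.map (fun ch => pvMapB.getD ch ch))

-- ===== PRECONDITION & SPEC =====
def Spec_convert_to_arabic_numerals (text : String) (out : String) : Prop := out = convert_to_arabic_numerals_alt text
instance (text : String) (out : String) : Decidable (Spec_convert_to_arabic_numerals text out) := by unfold Spec_convert_to_arabic_numerals; infer_instance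

-- ===== CLAIM (what is proved, stated in full; the proofs are below) =====
def Claim_equal_convert_to_arabic_numerals : Prop := ∀ (text : String), Dom_convert_to_arabic_numerals text → Spec_convert_to_arabic_numerals text (convert_to_arabic_numerals text)

-- ===== LEMMAS AND PROOFS =====

-- single-character replace is a map over the characters
theorem replace_go_single (w a : Char) (l : List Char) : ∀ (fuel : Nat) (acc : List Char),
    l.length ≤ fuel →
    PySem.Chars.replace.go [w] [a] fuel l acc
      = acc.reverse ++ l.map (fun c => if c = w then a else c) := by
  induction l with
  | nil =>
    intro fuel acc _
    cases fuel <;> simp [PySem.Chars.replace.go]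
  | cons c t ih =>
    intro fuel acc hle
    cases fuel with
    | zero => simp at hle
    | succ n =>
      rw [PySem.Chars.replace.go]
      rw [List.length_cons] at hle
      by_cases hcw : c = w
      · subst hcw
        simp only [List.length_cons, List.length_nil, Nat.zero_add, List.drop_succ_cons, List.drop_zero]
        rw [if_pos (by simp [List.isPrefixOf])]
        rw [ih n _ (by omega)]
        simp
      · have hpre : ([w].isPrefixOf (c :: t)) = false := by
          simp [List.isPrefixOf]
          exact fun h => absurd h.symm hcw
        rw [hpre]
        simp only [Bool.false_eq_true, if_false]
        rw [ih n _ (by omega)]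
        simp [hcw]

theorem replace_single (w a : Char) (s : List Char) :
    PySem.Chars.replace s [w] [a] = s.map (fun c => if c = w then a else c) := by
  rw [PySem.Chars.replace]
  simp only [List.isEmpty_cons, Bool.false_eq_true, if_false]
  rw [replace_go_single w a s s.length [] (le_refl _)]
  simp

-- the per-character translation both programs implement
def pvChain (c : Char) : Char :=
  if c = '0' then '٠' else if c = '1' then '١' else if c = '2' then '٢' else
  if c = '3' then '٣' else if c = '4' then '٤' else if c = '5' then '٥' else
  if c = '6' then '٦' else if c = '7' then '٧' else if c = '8' then '٨' else
  if c = '9' then '٩' else c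

theorem strRep_single (w a : Char) (s : String) :
    PySem.Str.replace s (String.ofList [w]) (String.ofList [a])
      = String.ofList (s.toList.map (fun c => if c = w then a else c)) := by
  rw [PySem.Str.replace, String.toList_ofList, String.toList_ofList, replace_single]

theorem getD_pvMapB (c : Char) : pvMapB.getD c c = pvChain c := by
  by_cases h0 : c = '0'; · subst h0; decide
  by_cases h1 : c = '1'; · subst h1; decide
  by_cases h2 : c = '2'; · subst h2; decide
  by_cases h3 : c = '3'; · subst h3; decide
  by_cases h4 : c = '4'; · subst h4; decide
  by_cases h5 : c = '5'; · subst h5; decide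
  by_cases h6 : c = '6'; · subst h6; decide
  by_cases h7 : c = '7'; · subst h7; decide
  by_cases h8 : c = '8'; · subst h8; decide
  by_cases h9 : c = '9'; · subst h9; decide
  have hit : pvMapB.items = [('0', '٠'), ('1', '١'), ('2', '٢'), ('3', '٣'), ('4', '٤'),
      ('5', '٥'), ('6', '٦'), ('7', '٧'), ('8', '٨'), ('9', '٩')] := by decide
  have b0 : ('0' == c) = false := by simp [Ne.symm h0]
  have b1 : ('1' == c) = false := by simp [Ne.symm h1]
  have b2 : ('2' == c) = false := by simp [Ne.symm h2]
  have b3 : ('3' == c) = false := by simp [Ne.symm h3]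
  have b4 : ('4' == c) = false := by simp [Ne.symm h4]
  have b5 : ('5' == c) = false := by simp [Ne.symm h5]
  have b6 : ('6' == c) = false := by simp [Ne.symm h6]
  have b7 : ('7' == c) = false := by simp [Ne.symm h7]
  have b8 : ('8' == c) = false := by simp [Ne.symm h8]
  have b9 : ('9' == c) = false := by simp [Ne.symm h9]
  rw [PySem.Dict.getD, PySem.Dict.get?, hit]
  simp [List.find?, b0, b1, b2, b3, b4, b5, b6, b7, b8, b9, pvChain,
    h0, h1, h2, h3, h4, h5, h6, h7, h8, h9]

-- pointwise: A's ten stacked single-digit substitutions compose to B's per-character translation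
theorem comp_eq_chain (c : Char) :
    ((fun c => if c = '9' then '٩' else c) ∘ (fun c => if c = '8' then '٨' else c) ∘
     (fun c => if c = '7' then '٧' else c) ∘ (fun c => if c = '6' then '٦' else c) ∘
     (fun c => if c = '5' then '٥' else c) ∘ (fun c => if c = '4' then '٤' else c) ∘
     (fun c => if c = '3' then '٣' else c) ∘ (fun c => if c = '2' then '٢' else c) ∘
     (fun c => if c = '1' then '١' else c) ∘ (fun c => if c = '0' then '٠' else c)) c = pvChain c := by
  by_cases h0 : c = '0'; · subst h0; decide
  by_cases h1 : c = '1'; · subst h1; decide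
  by_cases h2 : c = '2'; · subst h2; decide
  by_cases h3 : c = '3'; · subst h3; decide
  by_cases h4 : c = '4'; · subst h4; decide
  by_cases h5 : c = '5'; · subst h5; decide
  by_cases h6 : c = '6'; · subst h6; decide
  by_cases h7 : c = '7'; · subst h7; decide
  by_cases h8 : c = '8'; · subst h8; decide
  by_cases h9 : c = '9'; · subst h9; decide
  simp [pvChain, Function.comp_apply, h0, h1, h2, h3, h4, h5, h6, h7, h8, h9]

-- ===== VERDICT (by name: the statement is the Claim_ definition above) =====
set_option maxHeartbeats 1600000 in
theorem convert_to_arabic_numerals_spec : Claim_equal_convert_to_arabic_numerals := by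
  intro text _
  unfold Spec_convert_to_arabic_numerals convert_to_arabic_numerals convert_to_arabic_numerals_alt
  have hitems : pvMapA.items = [("0", "٠"), ("1", "١"), ("2", "٢"), ("3", "٣"), ("4", "٤"),
      ("5", "٥"), ("6", "٦"), ("7", "٧"), ("8", "٨"), ("9", "٩")] := by decide
  rw [hitems]
  have hlit : ∀ w a : Char, ∀ s : String,
      PySem.Str.replace s (String.ofList [w]) (String.ofList [a])
        = String.ofList (s.toList.map (fun c => if c = w then a else c)) := strRep_single
  have l0 : ("0" : String) = String.ofList ['0'] := by decide
  have l1 : ("1" : String) = String.ofList ['1'] := by decide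
  have l2 : ("2" : String) = String.ofList ['2'] := by decide
  have l3 : ("3" : String) = String.ofList ['3'] := by decide
  have l4 : ("4" : String) = String.ofList ['4'] := by decide
  have l5 : ("5" : String) = String.ofList ['5'] := by decide
  have l6 : ("6" : String) = String.ofList ['6'] := by decide
  have l7 : ("7" : String) = String.ofList ['7'] := by decide
  have l8 : ("8" : String) = String.ofList ['8'] := by decide
  have l9 : ("9" : String) = String.ofList ['9'] := by decide
  have a0 : ("٠" : String) = String.ofList ['٠'] := by decide
  have a1 : ("١" : String) = String.ofList ['١'] := by decide
  have a2 : ("٢" : String) = String.ofList ['٢'] := by decide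
  have a3 : ("٣" : String) = String.ofList ['٣'] := by decide
  have a4 : ("٤" : String) = String.ofList ['٤'] := by decide
  have a5 : ("٥" : String) = String.ofList ['٥'] := by decide
  have a6 : ("٦" : String) = String.ofList ['٦'] := by decide
  have a7 : ("٧" : String) = String.ofList ['٧'] := by decide
  have a8 : ("٨" : String) = String.ofList ['٨'] := by decide
  have a9 : ("٩" : String) = String.ofList ['٩'] := by decide
  simp only [List.foldl, l0, l1, l2, l3, l4, l5, l6, l7, l8, l9,
    a0, a1, a2, a3, a4, a5, a6, a7, a8, a9]
  simp only [hlit, String.toList_ofList, List.map_map]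
  refine congrArg String.ofList ?_
  apply List.map_congr_left
  intro c _
  rw [getD_pvMapB]
  exact comp_eq_chain c
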